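-- pv_equiv track=rewrite | github.com/YinZei/DoudizhuAI | doudizhu.py | matchXX
-- ===== SOURCE A (Python) =====
-- def matchXX(cards):
--     result = []
--
--     if len(cards) < 2:
--         return result
--
--     for i in range(len(cards) - 1):
--         if cards[i] == cards[i + 1]:
--             result.append((cards[i], cards[i]))
--
--     return sorted(list(set(result)))
-- ===== SOURCE B (Python) =====
-- def matchXX(cards):
--     vals = set()
--     i, n = 0, len(cards)
--     while i < n:
--         x = cards[i]
--         j = i + 1
--         while j < n and cards[j] == x:
--             j += 1
--         if j - i >= 2:
--             vals.add(x)
--         i = j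
--     return [(v, v) for v in sorted(vals)]
-- ===== Notes on version B (the rewrite author's own statement) =====
-- stated objective: alternative
-- what changed: B splits the hand into maximal runs of equal cards and records each value whose run is >= 2 in a set once, sorting plain values at the end, instead of A's per-index adjacent-pair comparison that appends duplicate pairs and then deduplicates and sorts the pair list.
import Mathlib
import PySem

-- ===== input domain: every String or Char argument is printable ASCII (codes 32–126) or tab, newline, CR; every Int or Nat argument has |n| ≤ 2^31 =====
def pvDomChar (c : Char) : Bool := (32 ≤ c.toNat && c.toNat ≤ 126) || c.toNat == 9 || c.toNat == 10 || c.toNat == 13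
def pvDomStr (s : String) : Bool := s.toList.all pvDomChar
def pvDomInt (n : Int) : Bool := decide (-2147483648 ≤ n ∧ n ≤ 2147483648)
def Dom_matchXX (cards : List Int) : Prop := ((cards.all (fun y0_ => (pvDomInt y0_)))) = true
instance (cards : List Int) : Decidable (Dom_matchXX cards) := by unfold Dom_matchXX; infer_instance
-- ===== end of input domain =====

-- B rewrites A's adjacent-pair scan as a run-length scan collecting each qualifying value once (objective: alternative).

-- ===== PORT A =====
def matchXX (cards : List Int) : List (Int × Int) :=
  let result : List (Int × Int) := []
  if cards.length < 2 then result
  else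
    let result :=
      (PySem.List.pyRange 0 ((cards.length : Int) - 1) 1).foldl
        (fun acc i =>
          if PySem.List.pyGetD cards i 0 = PySem.List.pyGetD cards (i + 1) 0 then
            acc ++ [(PySem.List.pyGetD cards i 0, PySem.List.pyGetD cards i 0)]
          else acc) result
    PySem.List.sorted (PySem.Set.ofList result) (fun x => toLex x) false

-- ===== PORT B =====
-- the outer while loop of Source B: each step consumes one maximal run of equal cards,
-- adding its value to the set when the run length (1 + length of the takeWhile part) is ≥ 2
def goRuns (cards : List Int) (vals : PySem.Set Int) : PySem.Set Int :=
  match cards with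
  | [] => vals
  | x :: xs =>
    let rest := xs.dropWhile (fun y => y == x)
    goRuns rest (if 1 + (xs.takeWhile (fun y => y == x)).length ≥ 2 then PySem.Set.add vals x else vals)
termination_by cards.length
decreasing_by simpa using Nat.lt_succ_of_le (List.length_dropWhile_le _ xs)

def matchXX_alt (cards : List Int) : List (Int × Int) :=
  (PySem.List.sorted (goRuns cards PySem.Set.empty) (fun v => v) false).map (fun v => (v, v))

-- ===== PRECONDITION & SPEC =====
def Spec_matchXX (cards : List Int) (out : List (Int × Int)) : Prop := out = matchXX_alt cards
instance (cards : List Int) (out : List (Int × Int)) : Decidable (Spec_matchXX cards out) := by unfold Spec_matchXX; infer_instance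

-- ===== CLAIM (what is proved, stated in full; the proofs are below) =====
def Claim_equal_matchXX : Prop := ∀ (cards : List Int), Dom_matchXX cards → Spec_matchXX cards (matchXX cards)

-- ===== LEMMAS AND PROOFS =====

-- the multiset of pairs A collects, written structurally over the list
def adjPairs : List Int → List (Int × Int)
  | [] => []
  | [_] => []
  | x :: y :: t => (if x = y then [(x, x)] else []) ++ adjPairs (y :: t)

def diag (v : Int) : Int × Int := (v, v)

lemma natfold_adjPairs (xs : List Int) (acc : List (Int × Int)) :
    (List.range (xs.length - 1)).foldl
      (fun acc k => if xs.getD k 0 = xs.getD (k + 1) 0 then acc ++ [(xs.getD k 0, xs.getD k 0)] else acc) acc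
      = acc ++ adjPairs xs := by
  induction xs generalizing acc with
  | nil => simp [adjPairs]
  | cons x xs ih =>
    cases xs with
    | nil => simp [adjPairs]
    | cons y t =>
      simp only [List.length_cons, Nat.add_sub_cancel] at ih ⊢
      rw [List.range_succ_eq_map, List.foldl_cons, List.foldl_map]
      simp only [List.getD_cons_zero, List.getD_cons_succ] at ih ⊢
      rw [ih]
      by_cases h : x = y <;> simp [adjPairs, h]

lemma fold_A_eq_adjPairs (cards : List Int) :
    (PySem.List.pyRange 0 ((cards.length : Int) - 1) 1).foldl
      (fun acc i =>
        if PySem.List.pyGetD cards i 0 = PySem.List.pyGetD cards (i + 1) 0 then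
          acc ++ [(PySem.List.pyGetD cards i 0, PySem.List.pyGetD cards i 0)]
        else acc) [] = adjPairs cards := by
  rw [PySem.List.pyRange_one, List.foldl_map]
  have : ((cards.length : Int) - 1 - 0).toNat = cards.length - 1 := by omega
  rw [this]
  have hfun : (fun (acc : List (Int × Int)) (k : ℕ) =>
      if PySem.List.pyGetD cards ((0 : Int) + (k : Int)) 0 = PySem.List.pyGetD cards ((0 : Int) + (k : Int) + 1) 0 then
        acc ++ [(PySem.List.pyGetD cards ((0 : Int) + (k : Int)) 0, PySem.List.pyGetD cards ((0 : Int) + (k : Int)) 0)]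
      else acc)
      = (fun (acc : List (Int × Int)) (k : ℕ) =>
      if cards.getD k 0 = cards.getD (k + 1) 0 then acc ++ [(cards.getD k 0, cards.getD k 0)] else acc) := by
    funext a k
    have h1 : (0 : Int) + (k : Int) = ((k : ℕ) : Int) := by omega
    have h2 : (0 : Int) + (k : Int) + 1 = ((k + 1 : ℕ) : Int) := by push_cast; omega
    rw [h1]
    have h2' : ((k : Int) + 1) = ((k + 1 : ℕ) : Int) := by push_cast; ring
    rw [h2', PySem.List.pyGetD_natCast, PySem.List.pyGetD_natCast]
  rw [hfun, natfold_adjPairs, List.nil_append]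

lemma adjPairs_run (x : Int) (xs : List Int) :
    adjPairs (x :: xs)
      = List.replicate (xs.takeWhile (fun y => y == x)).length (x, x)
        ++ adjPairs (xs.dropWhile (fun y => y == x)) := by
  induction xs with
  | nil => simp [adjPairs]
  | cons y t ih =>
    by_cases h : y = x
    · subst h
      have h1 : adjPairs (y :: y :: t) = (y, y) :: adjPairs (y :: t) := by simp [adjPairs]
      rw [h1, ih]
      simp [List.replicate_succ]
    · have hb : (y == x) = false := by simp [h]
      simp [adjPairs, hb, Ne.symm h]

lemma foldl_add_replicate (m : ℕ) (s : PySem.Set (Int × Int)) (p : Int × Int) :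
    (List.replicate m p).foldl PySem.Set.add s = if m = 0 then s else PySem.Set.add s p := by
  induction m generalizing s with
  | zero => simp
  | succ n ih =>
    rw [List.replicate_succ, List.foldl_cons, ih]
    by_cases h : n = 0
    · simp [h]
    · simp only [h, if_false, Nat.succ_ne_zero, if_false]
      rw [PySem.Set.add_eq_ite (PySem.Set.add s p) p]
      simp [PySem.Set.mem_add]

lemma map_diag_add (vals : PySem.Set Int) (x : Int) :
    (PySem.Set.add vals x).map diag = PySem.Set.add (vals.map diag) (diag x) := by
  rw [PySem.Set.add_eq_ite, PySem.Set.add_eq_ite]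
  have : diag x ∈ vals.map diag ↔ x ∈ vals := by
    constructor
    · rintro h
      rcases List.mem_map.mp h with ⟨a, ha, hax⟩
      have : a = x := by simpa [diag, Prod.ext_iff] using hax
      exact this ▸ ha
    · exact fun h => List.mem_map.mpr ⟨x, h, rfl⟩
  by_cases h : x ∈ vals <;> simp [h, this]

lemma setfold_eq_goRuns (cards : List Int) (vals : PySem.Set Int) :
    (adjPairs cards).foldl PySem.Set.add (vals.map diag) = (goRuns cards vals).map diag := by
  induction cards, vals using goRuns.induct with
  | case1 vals => simp [goRuns, adjPairs]
  | case2 vals x xs rest ih =>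
    rw [goRuns, adjPairs_run, List.foldl_append, foldl_add_replicate]
    by_cases h : (xs.takeWhile (fun y => y == x)).length = 0
    · have h2 : ¬ (1 + (xs.takeWhile (fun y => y == x)).length ≥ 2) := by omega
      rw [dif_neg h2] at ih
      rw [if_pos h, if_neg h2]
      exact ih
    · have h2 : 1 + (xs.takeWhile (fun y => y == x)).length ≥ 2 := by omega
      rw [dif_pos h2] at ih
      have hm := (map_diag_add vals x).symm
      simp only [diag] at hm
      rw [if_neg h, if_pos h2, hm]
      exact ih

lemma insertBy_map_diag (x : Int) (ys : List Int) :
    PySem.List.insertBy (fun a b => decide (toLex a < toLex b)) (diag x) (ys.map diag)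
      = (PySem.List.insertBy (fun a b => decide (a < b)) x ys).map diag := by
  induction ys with
  | nil => simp [PySem.List.insertBy, diag]
  | cons y t ih =>
    have hd : decide (toLex (diag x) < toLex (diag y)) = decide (x < y) := by
      simp [diag, Prod.Lex.lt_iff]
    simp only [List.map_cons, PySem.List.insertBy, hd]
    by_cases h : x < y
    · simp [h, diag]
    · simp only [h, decide_false, Bool.false_eq_true, if_false, List.map_cons]
      exact congrArg _ (by simpa [diag] using ih)

lemma sorted_map_diag (V : List Int) :
    PySem.List.sorted (V.map diag) (fun p => toLex p) false
      = (PySem.List.sorted V (fun v => v) false).map diag := by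
  rw [PySem.List.sorted_eq_foldl_insertBy, PySem.List.sorted_eq_foldl_insertBy, List.foldl_map]
  have : ∀ (l : List Int) (acc : List Int),
      l.foldl (fun acc x => PySem.List.insertBy (fun a b => decide (toLex a < toLex b)) (diag x) acc) (acc.map diag)
        = (l.foldl (fun acc x => PySem.List.insertBy (fun a b => decide (a < b)) x acc) acc).map diag := by
    intro l
    induction l with
    | nil => intro acc; simp
    | cons x t ih =>
      intro acc
      rw [List.foldl_cons, List.foldl_cons, insertBy_map_diag, ih]
  simpa using this V []

-- ===== VERDICT (by name: the statement is the Claim_ definition above) =====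
theorem matchXX_spec : Claim_equal_matchXX := by
  intro cards _
  show matchXX cards = matchXX_alt cards
  by_cases hlen : cards.length < 2
  · match cards, hlen with
    | [], _ => simp [matchXX, matchXX_alt, goRuns, PySem.List.sorted]
    | [a], _ => simp [matchXX, matchXX_alt, goRuns, PySem.List.sorted]
  · unfold matchXX matchXX_alt
    simp only [if_neg hlen]
    rw [fold_A_eq_adjPairs, PySem.Set.ofList_eq_foldl]
    rw [show ([] : List (Int × Int)) = (PySem.Set.empty : PySem.Set Int).map diag from rfl,
        setfold_eq_goRuns, sorted_map_diag]
    rfl
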